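-- pv_equiv track=rewrite | github.com/jf2024/LeetcodeProblemsSolved | 01-Arrays&Strings/reverseWords.py | alternativeTwoPointers
-- ===== SOURCE A (Python) =====
-- def alternativeTwoPointers(s: str) -> str:
--     """
--     Time complexity: O(N) - traverse list once
--     Space complexity: O(N) - the newlist var
--     """
--
--     newList = list(s)
--
--     left = 0
--     right = 0
--
--     for i in range(len(newList)):
--         if newList[i] == " " or i == len(newList) - 1: #if we hit an empty space or at the end of the list
--             right = i - 1 if newList[i] == " " else i   #if empty, i-1, ELSE just i
--             while left < right:
--                 newList[left], newList[right] = newList[right], newList[left] #switch the characters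
--                 left += 1
--                 right -= 1
--
--             left = i + 1    #set our left pointer index to the start of the next word after the space
--
--     return "".join(newList)
-- ===== SOURCE B (Python) =====
-- def alternativeTwoPointers(s: str) -> str:
--     return ' '.join(word[::-1] for word in s.split(' '))
-- ===== Notes on version B (the rewrite author's own statement) =====
-- stated objective: idiomatic
-- what changed: Replaces the mutable char-list two-pointer in-place swap loop (with left/right index bookkeeping) by a one-line split(' ')/reverse-each-token/join(' ') pipeline.
import Mathlib
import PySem

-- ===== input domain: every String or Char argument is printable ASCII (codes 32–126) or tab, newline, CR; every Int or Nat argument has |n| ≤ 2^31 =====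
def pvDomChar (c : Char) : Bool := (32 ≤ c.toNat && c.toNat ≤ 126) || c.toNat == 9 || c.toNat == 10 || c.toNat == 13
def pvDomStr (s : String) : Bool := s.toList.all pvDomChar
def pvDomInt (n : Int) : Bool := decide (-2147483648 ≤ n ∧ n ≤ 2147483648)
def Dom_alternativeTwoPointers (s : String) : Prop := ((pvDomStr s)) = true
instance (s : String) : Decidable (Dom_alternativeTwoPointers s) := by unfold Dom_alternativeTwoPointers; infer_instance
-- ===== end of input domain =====

-- B replaces A's mutable char-list two-pointer in-place swap loop by an idiomatic
-- split(' ') / reverse-each-token / join(' ') pipeline; return values agree on all inputs.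

-- ===== PORT A =====

-- the inner 'while left < right: swap' loop of A (only the final list and the leftover
-- left/right values are A's state after it)
def pvSwapLoop (lst : List Char) (left right : Int) : List Char × Int × Int :=
  if left < right then
    pvSwapLoop
      (PySem.List.pySetD (PySem.List.pySetD lst left (PySem.List.pyGetD lst right ' '))
        right (PySem.List.pyGetD lst left ' '))
      (left + 1) (right - 1)
  else (lst, left, right)
termination_by (right - left).toNat
decreasing_by omega

-- one iteration of A's for-loop; state = (newList, left, right)
def pvStepA (st : List Char × Int × Int) (i : Int) : List Char × Int × Int :=
  let lst := st.1
  let left := st.2.1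
  if PySem.List.pyGetD lst i ' ' = ' ' ∨ i = PySem.List.len lst - 1 then
    let right := if PySem.List.pyGetD lst i ' ' = ' ' then i - 1 else i
    let res := pvSwapLoop lst left right
    (res.1, i + 1, res.2.2)
  else st

def alternativeTwoPointers (s : String) : String :=
  let newList := s.toList
  let st := (PySem.List.pyRange 0 (PySem.List.len newList) 1).foldl pvStepA (newList, 0, 0)
  String.ofList st.1

-- ===== PORT B =====
def alternativeTwoPointers_alt (s : String) : String :=
  PySem.Str.join " "
    (((PySem.Str.split? s " ").getD []).map
      (fun w => (PySem.Str.slice? w none none (-1)).getD w))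

-- ===== PRECONDITION & SPEC =====
def Spec_alternativeTwoPointers (s : String) (out : String) : Prop := out = alternativeTwoPointers_alt s
instance (s : String) (out : String) : Decidable (Spec_alternativeTwoPointers s out) := by unfold Spec_alternativeTwoPointers; infer_instance

-- ===== CLAIM (what is proved, stated in full; the proofs are below) =====
def Claim_equal_alternativeTwoPointers : Prop := ∀ (s : String), Dom_alternativeTwoPointers s → Spec_alternativeTwoPointers s (alternativeTwoPointers s)

-- ===== LEMMAS AND PROOFS =====

-- split a char list at the space separators, as Python's s.split(' ') does
def pvMySplit (l : List Char) : List (List Char) :=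
  match h : l.dropWhile (· ≠ ' ') with
  | [] => [l.takeWhile (· ≠ ' ')]
  | _ :: t => l.takeWhile (· ≠ ' ') :: pvMySplit t
termination_by l.length
decreasing_by
  have hs := List.dropWhile_sublist (l := l) (p := (· ≠ ' '))
  have := hs.length_le
  rw [h] at this
  simp at this ⊢
  omega

-- the common value of both ports, on the char-list level
def pvRevWords (l : List Char) : List Char :=
  PySem.Chars.join [' '] ((pvMySplit l).map List.reverse)

theorem pvMySplit_nil : pvMySplit [] = [[]] := by
  unfold pvMySplit; rfl

theorem pvDropWhile_cons_head {p : Char → Bool} {l t : List Char} {c : Char}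
    (h : l.dropWhile p = c :: t) : p c = false := by
  induction l with
  | nil => simp at h
  | cons a l ih =>
    rw [List.dropWhile_cons] at h
    by_cases hp : p a = true
    · simp [hp] at h; exact ih h
    · simp [hp] at h; rw [← h.1]; simpa using hp

theorem pvMySplit_cons_space (t : List Char) : pvMySplit (' ' :: t) = [] :: pvMySplit t := by
  rw [pvMySplit]
  split
  · rename_i h; simp at h
  · rename_i a t1 h
    simp at h
    simp [h.2]

theorem pvMySplit_cons_ne {c : Char} (hc : c ≠ ' ') (l : List Char) :
    pvMySplit (c :: l) = (pvMySplit l).modifyHead (c :: ·) := by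
  rw [pvMySplit]
  split
  · rename_i h
    rw [List.dropWhile_cons_of_pos (by simp [hc])] at h
    rw [pvMySplit]
    split
    · simp [List.takeWhile_cons, hc]
    · rename_i a t1 h2
      rw [h] at h2; exact absurd h2 (by simp)
  · rename_i a t1 h
    rw [List.dropWhile_cons_of_pos (by simp [hc])] at h
    conv_rhs => rw [pvMySplit]
    split
    · rename_i h2; rw [h] at h2; exact absurd h2 (by simp)
    · rename_i a2 t2 h2
      rw [h] at h2
      injection h2 with h3 h4
      subst h4
      simp [List.takeWhile_cons, hc]

theorem pvMySplit_ne_nil (l : List Char) : pvMySplit l ≠ [] := by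
  unfold pvMySplit
  split <;> simp

theorem pvGo_spec (fuel : Nat) : ∀ (l cur : List Char) (acc : List (List Char)) (hl : l.length < fuel),
    PySem.Chars.splitOn.go [' '] fuel l cur acc
      = acc.reverse ++ (pvMySplit l).modifyHead (cur.reverse ++ ·) := by
  induction fuel with
  | zero => intro l cur acc hl; exact absurd hl (by omega)
  | succ fuel ih =>
    intro l cur acc hl
    match l with
    | [] =>
      rw [PySem.Chars.splitOn.go.eq_2 _ _ _ _ (by omega), pvMySplit_nil]
      simp
    | c :: rest =>
      have hrest : rest.length < fuel := by simpa using Nat.lt_of_succ_lt_succ hl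
      rw [PySem.Chars.splitOn.go.eq_3]
      by_cases hc : c = ' '
      · subst hc
        rw [if_pos (by simp [List.isPrefixOf])]
        simp only [List.length_cons, List.length_nil, List.drop_succ_cons, List.drop_zero]
        rw [ih rest [] _ hrest, pvMySplit_cons_space]
        obtain ⟨x, xs, hx⟩ := List.exists_cons_of_ne_nil (pvMySplit_ne_nil rest)
        simp [hx]
      · rw [if_neg (by simp [List.isPrefixOf]; exact fun h => hc h.symm)]
        rw [ih rest (c :: cur) acc hrest, pvMySplit_cons_ne hc]
        obtain ⟨x, xs, hx⟩ := List.exists_cons_of_ne_nil (pvMySplit_ne_nil rest)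
        simp [hx]

theorem pvSplitOn_eq (l : List Char) : PySem.Chars.splitOn l [' '] = pvMySplit l := by
  rw [PySem.Chars.splitOn, pvGo_spec (l.length + 1) l [] [] (by omega)]
  obtain ⟨x, xs, hx⟩ := List.exists_cons_of_ne_nil (pvMySplit_ne_nil l)
  simp [hx]

theorem pvMySplit_word {w : List Char} (hw : ∀ c ∈ w, c ≠ ' ') : pvMySplit w = [w] := by
  induction w with
  | nil => exact pvMySplit_nil
  | cons c w ih =>
    rw [pvMySplit_cons_ne (hw c (by simp)) w, ih (fun c hc => hw c (by simp [hc]))]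
    rfl

theorem pvMySplit_word_append {w : List Char} (hw : ∀ c ∈ w, c ≠ ' ') (t : List Char) :
    pvMySplit (w ++ ' ' :: t) = w :: pvMySplit t := by
  induction w with
  | nil => simpa using pvMySplit_cons_space t
  | cons c w ih =>
    rw [List.cons_append, pvMySplit_cons_ne (hw c (by simp)) _,
        ih (fun c hc => hw c (by simp [hc]))]
    rfl

theorem pvRevWords_word {w : List Char} (hw : ∀ c ∈ w, c ≠ ' ') :
    pvRevWords w = w.reverse := by
  rw [pvRevWords, pvMySplit_word hw]
  exact PySem.Chars.join_singleton _ _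

theorem pvRevWords_nil : pvRevWords [] = [] := by
  rw [pvRevWords, pvMySplit_nil]
  simpa using PySem.Chars.join_singleton [' '] []

theorem pvRevWords_append {w : List Char} (hw : ∀ c ∈ w, c ≠ ' ') (t : List Char) :
    pvRevWords (w ++ ' ' :: t) = w.reverse ++ ' ' :: pvRevWords t := by
  rw [pvRevWords, pvMySplit_word_append hw]
  obtain ⟨x, xs, hx⟩ := List.exists_cons_of_ne_nil (pvMySplit_ne_nil t)
  rw [pvRevWords, hx]
  simp only [List.map_cons]
  rw [PySem.Chars.join_cons_cons]
  simp

-- fold of a pointwise-fixing function is the identity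
theorem pvFoldl_fix {α β : Type} (f : β → α → β) (st : β) :
    ∀ (l : List α), (∀ i ∈ l, f st i = st) → l.foldl f st = st := by
  intro l
  induction l with
  | nil => intro _; rfl
  | cons a l ih =>
    intro h
    rw [List.foldl_cons, h a (by simp)]
    exact ih (fun i hi => h i (by simp [hi]))

-- A's for-loop does nothing while scanning the first m characters of the current word
theorem pvWordPass (done w rest : List Char) (m : Nat) (hw : ∀ c ∈ w, c ≠ ' ')
    (hm : m ≤ w.length) (hlt : done.length + m < (done ++ w ++ rest).length) (l2 r : Int) :
    (PySem.List.pyRange done.length (((done.length + m : Nat) : Int)) 1).foldl pvStepA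
      (done ++ w ++ rest, l2, r) = (done ++ w ++ rest, l2, r) := by
  have hlen : (done ++ w ++ rest).length = done.length + w.length + rest.length := by
    simp; omega
  apply pvFoldl_fix
  intro i hi
  rw [PySem.List.mem_pyRange_one] at hi
  obtain ⟨hi1, hi2⟩ := hi
  have h0 : (0 : Int) ≤ i := le_trans (Int.natCast_nonneg _) hi1
  have hij : ((i.toNat : Nat) : Int) = i := Int.toNat_of_nonneg h0
  have hjw : i.toNat - done.length < w.length := by omega
  have hjlen : i.toNat < (done ++ w ++ rest).length := by omega
  have hget : PySem.List.pyGetD (done ++ w ++ rest) i ' ' = w[i.toNat - done.length]'hjw := by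
    conv_lhs => rw [← hij]
    rw [PySem.List.pyGetD_natCast, List.getD_eq_getElem _ _ hjlen,
      List.getElem_append_left (by simp; omega), List.getElem_append_right (by omega)]
  have hcond : ¬ (PySem.List.pyGetD (done ++ w ++ rest) i ' ' = ' '
      ∨ i = PySem.List.len (done ++ w ++ rest) - 1) := by
    push_neg
    refine ⟨?_, ?_⟩
    · rw [hget]; exact hw _ (List.getElem_mem _)
    · rw [PySem.List.len_eq]; omega
  simp only [pvStepA]
  rw [if_neg hcond]

-- the swap loop reverses exactly the segment holding w
theorem pvSwapLoop_fst (n : Nat) : ∀ (w done rest : List Char) (L R : Int),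
    w.length ≤ n → L = (done.length : Int) → R = (done.length : Int) + w.length - 1 →
    (pvSwapLoop (done ++ w ++ rest) L R).1 = done ++ w.reverse ++ rest := by
  induction n with
  | zero =>
    intro w done rest L R hn hL hR
    have hw0 : w = [] := List.eq_nil_of_length_eq_zero (by omega)
    subst hw0
    rw [pvSwapLoop, if_neg (by simp at hR; omega)]
    simp
  | succ n ih =>
    intro w done rest L R hn hL hR
    by_cases hsmall : w.length ≤ 1
    · rw [pvSwapLoop, if_neg (by omega)]
      rcases w with _ | ⟨a, w1⟩
      · simp
      · rcases w1 with _ | ⟨b, w2⟩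
        · simp
        · simp at hsmall
    · push_neg at hsmall
      rcases w with _ | ⟨a, w1⟩
      · simp at hsmall
      rcases List.eq_nil_or_concat w1 with h1 | ⟨mid, b, rfl⟩
      · subst h1; simp at hsmall
      rw [List.concat_eq_append]
      rw [List.concat_eq_append] at hn hR hsmall
      have hlen : (a :: (mid ++ [b])).length = mid.length + 2 := by simp
      rw [pvSwapLoop, if_pos (by omega)]
      have hR' : R = ((done.length + (mid.length + 1) : Nat) : Int) := by push_cast; omega
      have hgetR : PySem.List.pyGetD (done ++ a :: (mid ++ [b]) ++ rest) R ' ' = b := by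
        rw [hR', PySem.List.pyGetD_natCast,
          List.getD_append _ _ _ _ (by simp; try omega),
          List.getD_append_right _ _ _ _ (by omega),
          show done.length + (mid.length + 1) - done.length = mid.length + 1 from by omega,
          List.getD_cons_succ, List.getD_append_right _ _ _ _ (by omega),
          Nat.sub_self, List.getD_cons_zero]
      have hgetL : PySem.List.pyGetD (done ++ a :: (mid ++ [b]) ++ rest) L ' ' = a := by
        rw [hL, PySem.List.pyGetD_natCast,
          List.getD_append _ _ _ _ (by simp; try omega),
          List.getD_append_right _ _ _ _ (by omega),
          Nat.sub_self, List.getD_cons_zero]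
      have hset1 : (done ++ a :: (mid ++ [b]) ++ rest).set done.length b
          = (done ++ b :: (mid ++ [b])) ++ rest := by
        rw [List.set_append_left _ _ (by simp; try omega),
          List.set_append_right _ _ le_rfl, Nat.sub_self, List.set_cons_zero]
      have hset2 : ((done ++ b :: (mid ++ [b])) ++ rest).set (done.length + (mid.length + 1)) a
          = (done ++ [b]) ++ mid ++ (a :: rest) := by
        rw [List.set_append_left _ _ (by simp; try omega),
          List.set_append_right _ _ (by omega),
          show done.length + (mid.length + 1) - done.length = mid.length + 1 from by omega,
          List.set_cons_succ,
          List.set_append_right _ _ le_rfl, Nat.sub_self, List.set_cons_zero]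
        simp
      have hset : PySem.List.pySetD (PySem.List.pySetD (done ++ a :: (mid ++ [b]) ++ rest) L
            (PySem.List.pyGetD (done ++ a :: (mid ++ [b]) ++ rest) R ' ')) R
            (PySem.List.pyGetD (done ++ a :: (mid ++ [b]) ++ rest) L ' ')
          = (done ++ [b]) ++ mid ++ (a :: rest) := by
        rw [hgetR, hgetL, hL, hR']
        simp only [PySem.List.pySetD_natCast]
        rw [hset1, hset2]
      rw [hset]
      rw [ih mid (done ++ [b]) (a :: rest) (L + 1) (R - 1) (by omega)
        (by simp; omega) (by simp; push_cast; omega)]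
      simp

-- the main loop invariant: from the start of a word, A finishes into reversed words
theorem pvLoopA (n : Nat) : ∀ (w rest done : List Char), w.length + rest.length ≤ n →
    (∀ c ∈ w, c ≠ ' ') → (rest = [] ∨ ∃ t, rest = ' ' :: t) → ∀ r : Int,
    ((PySem.List.pyRange done.length ((done ++ w ++ rest).length) 1).foldl pvStepA
        (done ++ w ++ rest, (done.length : Int), r)).1
      = done ++ pvRevWords (w ++ rest) := by
  induction n with
  | zero =>
    intro w rest done hn hw hr r
    have hw0 : w = [] := List.eq_nil_of_length_eq_zero (by omega)
    have hr0 : rest = [] := List.eq_nil_of_length_eq_zero (by omega)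
    subst hw0; subst hr0
    simp only [List.append_nil]
    rw [PySem.List.pyRange_one_eq_nil le_rfl, List.foldl_nil, pvRevWords_nil]
    simp
  | succ n ih =>
    intro w rest done hn hw hr r
    rcases hr with rfl | ⟨t, rfl⟩
    · -- rest = []: the last word (if any) is reversed at the final index
      rcases List.eq_nil_or_concat w with rfl | ⟨w0, c, rfl⟩
      · simp only [List.append_nil]
        rw [PySem.List.pyRange_one_eq_nil le_rfl, List.foldl_nil, pvRevWords_nil]
        simp
      · rw [List.concat_eq_append] at *
        have hlen : (done ++ (w0 ++ [c]) ++ []).length = done.length + w0.length + 1 := by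
          simp; try omega
        have hsplit := PySem.List.pyRange_one_append (done.length : Int)
          ((done.length + w0.length : Nat) : Int)
          (((done ++ (w0 ++ [c]) ++ []).length : Nat) : Int) (by omega) (by omega)
        rw [hsplit, List.foldl_append]
        rw [pvWordPass done (w0 ++ [c]) [] w0.length hw (by simp) (by omega)]
        have hbound : (((done ++ (w0 ++ [c]) ++ []).length : Nat) : Int)
            = ((done.length + w0.length : Nat) : Int) + 1 := by omega
        rw [hbound]
        rw [PySem.List.pyRange_one_singleton, List.foldl_cons, List.foldl_nil]
        have hget : PySem.List.pyGetD (done ++ (w0 ++ [c]) ++ [])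
            ((done.length + w0.length : Nat) : Int) ' ' = c := by
          rw [PySem.List.pyGetD_natCast, List.getD_append _ _ _ _ (by simp),
            List.getD_append_right _ _ _ _ (by omega),
            show done.length + w0.length - done.length = w0.length from by omega,
            List.getD_append_right _ _ _ _ (by omega), Nat.sub_self, List.getD_cons_zero]
        have hc' : c ≠ ' ' := hw c (by simp)
        simp only [pvStepA, hget]
        rw [if_neg hc', if_pos (Or.inr (show ((done.length + w0.length : Nat) : Int)
          = PySem.List.len (done ++ (w0 ++ [c]) ++ []) - 1 from by
            rw [PySem.List.len_eq, hlen]; push_cast; omega))]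
        rw [pvSwapLoop_fst (w0 ++ [c]).length (w0 ++ [c]) done [] _ _ le_rfl rfl
          (by simp; push_cast; omega)]
        simp only [List.append_nil]
        rw [pvRevWords_word hw]
    · -- rest = ' ' :: t: the word is reversed at the separating space, then recurse
      have hlen : (done ++ w ++ (' ' :: t)).length = done.length + w.length + t.length + 1 := by
        simp; try omega
      have hsplit1 := PySem.List.pyRange_one_append (done.length : Int)
        ((done.length + w.length : Nat) : Int)
        (((done ++ w ++ (' ' :: t)).length : Nat) : Int) (by omega) (by omega)
      rw [hsplit1, List.foldl_append]
      rw [pvWordPass done w (' ' :: t) w.length hw le_rfl (by omega)]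
      have hsplit2 := PySem.List.pyRange_one_append ((done.length + w.length : Nat) : Int)
        (((done.length + w.length : Nat) : Int) + 1)
        (((done ++ w ++ (' ' :: t)).length : Nat) : Int) (by omega) (by omega)
      rw [hsplit2, List.foldl_append]
      rw [PySem.List.pyRange_one_singleton, List.foldl_cons, List.foldl_nil]
      have hget : PySem.List.pyGetD (done ++ w ++ (' ' :: t))
          ((done.length + w.length : Nat) : Int) ' ' = ' ' := by
        rw [PySem.List.pyGetD_natCast, List.getD_append_right _ _ _ _ (by simp),
          show done.length + w.length - (done ++ w).length = 0 from by simp,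
          List.getD_cons_zero]
      have hstep : pvStepA (done ++ w ++ (' ' :: t), (done.length : Int), r)
            ((done.length + w.length : Nat) : Int)
          = (done ++ w.reverse ++ (' ' :: t), ((done.length + w.length : Nat) : Int) + 1,
             (pvSwapLoop (done ++ w ++ (' ' :: t)) (done.length : Int)
               (((done.length + w.length : Nat) : Int) - 1)).2.2) := by
        simp only [pvStepA, hget, true_or, if_true]
        rw [pvSwapLoop_fst w.length w done (' ' :: t) _ _ le_rfl rfl (by push_cast; omega)]
      rw [hstep]
      have hmem : ∀ c ∈ t.takeWhile (· ≠ ' '), c ≠ ' ' := by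
        intro c hc
        simpa using List.mem_takeWhile_imp hc
      have hshape : t.dropWhile (· ≠ ' ') = [] ∨ ∃ t', t.dropWhile (· ≠ ' ') = ' ' :: t' := by
        rcases hd : t.dropWhile (· ≠ ' ') with _ | ⟨c, t'⟩
        · exact Or.inl rfl
        · refine Or.inr ⟨t', ?_⟩
          have hc := pvDropWhile_cons_head hd
          simp at hc
          rw [hc]
      have htlen : (t.takeWhile (· ≠ ' ')).length + (t.dropWhile (· ≠ ' ')).length
          = t.length := by
        have h2 := congrArg List.length
          (List.takeWhile_append_dropWhile (p := (· ≠ ' ')) (l := t))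
        rw [List.length_append] at h2
        exact h2
      have key := ih (t.takeWhile (· ≠ ' ')) (t.dropWhile (· ≠ ' '))
        (done ++ w.reverse ++ [' ']) (by simp at hn; omega) hmem hshape
        ((pvSwapLoop (done ++ w ++ (' ' :: t)) (done.length : Int)
          (((done.length + w.length : Nat) : Int) - 1)).2.2)
      have hlist : done ++ w.reverse ++ (' ' :: t)
          = (done ++ w.reverse ++ [' ']) ++ t.takeWhile (· ≠ ' ') ++ t.dropWhile (· ≠ ' ') := by
        simp [List.append_assoc]
      have hleft : (((done.length + w.length : Nat) : Int) + 1)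
          = (((done ++ w.reverse ++ [' ']).length : Nat) : Int) := by
        simp; try omega
      have hupper : (((done ++ w ++ (' ' :: t)).length : Nat) : Int)
          = ((((done ++ w.reverse ++ [' ']) ++ t.takeWhile (· ≠ ' ')
              ++ t.dropWhile (· ≠ ' ')).length : Nat) : Int) := by
        simp; try omega
      rw [hlist, hleft, hupper, key]
      rw [List.takeWhile_append_dropWhile, pvRevWords_append hw]
      simp

theorem pvA_eq (s : String) : alternativeTwoPointers s = String.ofList (pvRevWords s.toList) := by
  rw [alternativeTwoPointers]
  simp only [PySem.List.len_eq]
  have hmem : ∀ c ∈ s.toList.takeWhile (· ≠ ' '), c ≠ ' ' := by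
    intro c hc
    simpa using List.mem_takeWhile_imp hc
  have hshape : s.toList.dropWhile (· ≠ ' ') = []
      ∨ ∃ t', s.toList.dropWhile (· ≠ ' ') = ' ' :: t' := by
    rcases hd : s.toList.dropWhile (· ≠ ' ') with _ | ⟨c, t'⟩
    · exact Or.inl rfl
    · refine Or.inr ⟨t', ?_⟩
      have hc := pvDropWhile_cons_head hd
      simp at hc
      rw [hc]
  have htlen : (s.toList.takeWhile (· ≠ ' ')).length + (s.toList.dropWhile (· ≠ ' ')).length
      = s.toList.length := by
    have h2 := congrArg List.length
      (List.takeWhile_append_dropWhile (p := (· ≠ ' ')) (l := s.toList))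
    rw [List.length_append] at h2
    exact h2
  have key := pvLoopA s.toList.length (s.toList.takeWhile (· ≠ ' '))
    (s.toList.dropWhile (· ≠ ' ')) [] (by omega) hmem hshape 0
  simp only [List.nil_append, List.takeWhile_append_dropWhile, List.length_nil,
    Nat.cast_zero] at key
  rw [key]

theorem pvB_eq (s : String) : alternativeTwoPointers_alt s = String.ofList (pvRevWords s.toList) := by
  have hsp : (" " : String).toList = [' '] := rfl
  rw [alternativeTwoPointers_alt, PySem.Str.join, PySem.Str.split?, PySem.Chars.split?, hsp]
  rw [if_neg (by simp)]
  simp only [Option.map_some, Option.getD_some, List.map_map, pvSplitOn_eq, pvRevWords]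
  refine congrArg String.ofList (congrArg (PySem.Chars.join [' ']) ?_)
  apply List.map_congr_left
  intro w _
  simp [Function.comp, PySem.Str.slice?_none_none_neg_one]

-- ===== VERDICT (by name: the statement is the Claim_ definition above) =====
theorem alternativeTwoPointers_spec : Claim_equal_alternativeTwoPointers := by
  intro s _
  unfold Spec_alternativeTwoPointers
  rw [pvA_eq, pvB_eq]
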